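-- pv_equiv track=rewrite | github.com/lbulegon/Core_SinapUm | app_sinaplint/engine/graph/graph_serializer.py | to_nodes_edges
-- ===== SOURCE A (Python) =====
-- def to_nodes_edges(graph: dict[str, list[str] | set[str]]) -> dict[str, list[dict[str, str]]]:
--     nodes = [{"id": app} for app in sorted(graph.keys())]
--     # Incluir nós que só aparecem como destino
--     targets = {t for vs in graph.values() for t in (vs if isinstance(vs, (list, set)) else [])}
--     for t in sorted(targets):
--         if t not in graph:
--             nodes.append({"id": t})
--     nodes = sorted(nodes, key=lambda x: x["id"])
--
--     edges: list[dict[str, str]] = []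
--     seen: set[tuple[str, str]] = set()
--     for source, targets in graph.items():
--         ts = targets if isinstance(targets, (list, set)) else []
--         for target in sorted(ts):
--             key = (source, target)
--             if key in seen:
--                 continue
--             seen.add(key)
--             edges.append({"source": source, "target": target})
--
--     return {"nodes": nodes, "edges": edges}
-- ===== SOURCE B (Python) =====
-- def to_nodes_edges(graph: dict[str, list[str] | set[str]]) -> dict[str, list[dict[str, str]]]:
--     # One global sort of index-tagged deduplicated (source, target) triples
--     # replaces the nested per-source loops with a seen-set.
--     pairs = sorted({(i, s, t)
--                     for i, (s, vs) in enumerate(graph.items())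
--                     for t in (vs if isinstance(vs, (list, set)) else [])},
--                    key=lambda p: (p[0], p[2]))
--     edges = [{"source": s, "target": t} for _, s, t in pairs]
--     # Nodes: sort keys + targets WITH duplicates, then drop adjacent duplicates in one scan.
--     ids = sorted(list(graph) + [t for _, _, t in pairs])
--     nodes = []
--     for x in ids:
--         if not nodes or nodes[-1]["id"] != x:
--             nodes.append({"id": x})
--     return {"nodes": nodes, "edges": edges}
-- ===== Notes on version B (the rewrite author's own statement) =====
-- stated objective: alternative
-- what changed: Edges come from ONE global sort of the index-tagged deduplicated (i, source, target) triple set (sort-then-emit) instead of A's nested per-source loops with a global seen-set accumulator, and nodes are built by sorting keys+targets WITH duplicates and dropping adjacent duplicates in a single scan instead of A's set-based three-stage sort/append/re-sort pipeline.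
import Mathlib
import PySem

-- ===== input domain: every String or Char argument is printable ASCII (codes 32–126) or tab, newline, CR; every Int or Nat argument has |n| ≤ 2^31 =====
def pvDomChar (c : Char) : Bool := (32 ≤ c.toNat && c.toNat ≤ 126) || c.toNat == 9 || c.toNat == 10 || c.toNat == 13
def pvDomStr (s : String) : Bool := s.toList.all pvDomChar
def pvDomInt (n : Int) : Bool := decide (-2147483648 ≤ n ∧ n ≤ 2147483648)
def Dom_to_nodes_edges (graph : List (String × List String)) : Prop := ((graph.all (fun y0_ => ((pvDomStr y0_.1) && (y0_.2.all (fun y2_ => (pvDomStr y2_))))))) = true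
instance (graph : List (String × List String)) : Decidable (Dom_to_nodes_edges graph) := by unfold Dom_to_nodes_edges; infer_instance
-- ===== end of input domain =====

-- ===== PORT A =====
-- B replaces the nested edge loops + seen-set by one global sort of index-tagged
-- deduplicated triples, and the node pipeline by sort-with-duplicates + adjacent-dedup scan;
-- objective: alternative (same asymptotic cost).
def to_nodes_edges (graph : List (String × List String)) : List (String × List (List (String × String))) :=
  -- nodes = [{"id": app} for app in sorted(graph.keys())]
  let nodes : List (List (String × String)) :=
    (PySem.List.sorted (graph.map Prod.fst) (fun x => x)).map (fun app => [("id", app)])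
  -- targets = {t for vs in graph.values() for t in vs}   (values are lists here)
  let targets : PySem.Set String := PySem.Set.ofList (graph.flatMap Prod.snd)
  -- for t in sorted(targets): if t not in graph: nodes.append({"id": t})
  let nodes :=
    (PySem.List.sorted targets (fun x => x)).foldl
      (fun nodes t =>
        if PySem.Dict.contains ⟨graph⟩ t then nodes else nodes ++ [[("id", t)]]) nodes
  -- nodes = sorted(nodes, key=lambda x: x["id"])
  let nodes :=
    PySem.List.sorted nodes (fun x => (PySem.Dict.get? (⟨x⟩ : PySem.Dict String String) "id").getD "")
  -- edges loop with the global seen set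
  let st :=
    graph.foldl
      (fun (st : List (List (String × String)) × PySem.Set (String × String)) sv =>
        (PySem.List.sorted sv.2 (fun x => x)).foldl
          (fun st target =>
            if PySem.Set.contains st.2 (sv.1, target) then st
            else (st.1 ++ [[("source", sv.1), ("target", target)]],
                  PySem.Set.add st.2 (sv.1, target)))
          st)
      ([], PySem.Set.empty)
  [("nodes", nodes), ("edges", st.1)]

-- ===== PORT B =====
def to_nodes_edges_alt (graph : List (String × List String)) : List (String × List (List (String × String))) :=
  -- pairs = sorted({(i, s, t) for i, (s, vs) in enumerate(graph.items()) for t in vs},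
  --                key=lambda p: (p[0], p[2]))
  let pairs :=
    PySem.List.sorted2
      (PySem.Set.ofList ((PySem.List.enumerate graph).flatMap
        (fun isv => isv.2.2.map (fun t => (isv.1, isv.2.1, t)))))
      (fun p => p.1) (fun p => p.2.2)
  -- edges = [{"source": s, "target": t} for _, s, t in pairs]
  let edges := pairs.map (fun p => [("source", p.2.1), ("target", p.2.2)])
  -- ids = sorted(list(graph) + [t for _, _, t in pairs])
  let ids := PySem.List.sorted (graph.map Prod.fst ++ pairs.map (fun p => p.2.2)) (fun x => x)
  -- adjacent-duplicate drop: for x in ids: if not nodes or nodes[-1]["id"] != x: nodes.append(...)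
  let nodes := ids.foldl
    (fun nodes x =>
      if nodes.isEmpty ||
         (((PySem.Dict.get? (⟨PySem.List.pyGetD nodes (-1) []⟩ : PySem.Dict String String) "id").getD "") != x)
      then nodes ++ [[("id", x)]] else nodes) []
  [("nodes", nodes), ("edges", edges)]

-- ===== PRECONDITION & SPEC =====
-- Pre_ excludes association lists with duplicate keys: they encode no Python dict unambiguously
-- (Python collapses the duplicates before A ever runs), so list-level behaviour there is accidental.
def Pre_to_nodes_edges (graph : List (String × List String)) : Prop :=
  (graph.map Prod.fst).Nodup
instance (graph : List (String × List String)) : Decidable (Pre_to_nodes_edges graph) := by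
  unfold Pre_to_nodes_edges; infer_instance
def pvWitness_to_nodes_edges : (List (String × List String)) :=
  [("a", ["b", "c", "b"]), ("c", [])]
def Spec_to_nodes_edges (graph : List (String × List String)) (out : List (String × List (List (String × String)))) : Prop := out = to_nodes_edges_alt graph
instance (graph : List (String × List String)) (out : List (String × List (List (String × String)))) : Decidable (Spec_to_nodes_edges graph out) := by unfold Spec_to_nodes_edges; infer_instance

-- ===== CLAIM (what is proved, stated in full; the proofs are below) =====
def Claim_equal_to_nodes_edges : Prop := ∀ (graph : List (String × List String)), Dom_to_nodes_edges graph → Pre_to_nodes_edges graph → Spec_to_nodes_edges graph (to_nodes_edges graph)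

-- ===== LEMMAS AND PROOFS =====

-- abbreviations used only by the proofs
def nbox (t : String) : List (String × String) := [("id", t)]
def ebox (s t : String) : List (String × String) := [("source", s), ("target", t)]
def estep (s : String) (st : List (List (String × String)) × PySem.Set (String × String))
    (target : String) : List (List (String × String)) × PySem.Set (String × String) :=
  if PySem.Set.contains st.2 (s, target) then st
  else (st.1 ++ [ebox s target], PySem.Set.add st.2 (s, target))
def nstep (acc : List (List (String × String))) (x : String) : List (List (String × String)) :=
  if acc.isEmpty ||
     (((PySem.Dict.get? (⟨PySem.List.pyGetD acc (-1) []⟩ : PySem.Dict String String) "id").getD "") != x)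
  then acc ++ [nbox x] else acc
def tkey (p : Int × String × String) : Lex (Int × String) := toLex (p.1, p.2.2)
def blk (isv : Int × String × List String) : List (Int × String × String) :=
  (PySem.List.sorted (PySem.Set.ofList isv.2.2) (fun x => x)).map (fun t => (isv.1, isv.2.1, t))
def ysOf (g : List (String × List String)) (s : Int) : List (Int × String × String) :=
  (PySem.List.enumerate g s).flatMap blk

theorem update_sublist {α : Type} [BEq α] :
    ∀ (xs : List α) (P : PySem.Set α), (PySem.Set.update P xs).Sublist (P ++ xs) := by
  intro xs
  induction xs with
  | nil => intro P; simp [PySem.Set.update]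
  | cons x xs ih =>
    intro P
    show (PySem.Set.update (PySem.Set.add P x) xs).Sublist _
    by_cases h : PySem.Set.contains P x
    · have : PySem.Set.add P x = P := by unfold PySem.Set.add; rw [if_pos h]
      rw [this]
      exact (ih P).trans (List.append_sublist_append_left P |>.mpr (List.sublist_cons_self x xs))
    · have : PySem.Set.add P x = P ++ [x] := by unfold PySem.Set.add; rw [if_neg h]
      rw [this]
      simpa using ih (P ++ [x])

theorem ofList_sublist {α : Type} [BEq α] (xs : List α) :
    (PySem.Set.ofList xs).Sublist xs := by
  simpa using update_sublist xs PySem.Set.empty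

theorem update_prefix {α : Type} [BEq α] :
    ∀ (xs : List α) (P : PySem.Set α), ∃ R, PySem.Set.update P xs = P ++ R := by
  intro xs
  induction xs with
  | nil => intro P; exact ⟨[], by simp [PySem.Set.update]⟩
  | cons x xs ih =>
    intro P
    show ∃ R, PySem.Set.update (PySem.Set.add P x) xs = P ++ R
    by_cases h : PySem.Set.contains P x
    · have hadd : PySem.Set.add P x = P := by unfold PySem.Set.add; rw [if_pos h]
      rw [hadd]; exact ih P
    · have hadd : PySem.Set.add P x = P ++ [x] := by unfold PySem.Set.add; rw [if_neg h]
      obtain ⟨R, hR⟩ := ih (PySem.Set.add P x)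
      exact ⟨x :: R, by rw [hR, hadd]; simp⟩

theorem pairwise_lt_of_nodup_sorted {l : List String}
    (hp : l.Pairwise (· ≤ ·)) (hn : l.Nodup) : l.Pairwise (· < ·) :=
  (hp.and hn).imp (fun h => lt_of_le_of_ne h.1 h.2)

theorem sorted_ofList_comm (ts : List String) :
    PySem.Set.ofList (PySem.List.sorted ts (fun x => x)) =
      PySem.List.sorted (PySem.Set.ofList ts) (fun x => x) := by
  have hperm : (PySem.Set.ofList (PySem.List.sorted ts (fun x => x))).Perm (PySem.Set.ofList ts) := by
    rw [List.perm_ext_iff_of_nodup (PySem.Set.nodup_ofList _) (PySem.Set.nodup_ofList _)]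
    intro a
    rw [PySem.Set.mem_ofList, PySem.Set.mem_ofList, PySem.List.mem_sorted]
  have hpw := pairwise_lt_of_nodup_sorted
      (List.Pairwise.sublist (ofList_sublist _) (PySem.List.sorted_pairwise ts (fun x => x)))
      (PySem.Set.nodup_ofList (PySem.List.sorted ts (fun x => x)))
  exact (PySem.List.sorted_eq_of_perm_of_pairwise_lt _ _ _ hperm hpw).symm

theorem contains_keys (graph : List (String × List String)) (t : String) :
    PySem.Dict.contains (⟨graph⟩ : PySem.Dict String (List String)) t = true ↔
      t ∈ graph.map Prod.fst := by
  simp [PySem.Dict.contains, List.any_eq_true, List.mem_map, beq_iff_eq]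

theorem nodes_eq (graph : List (String × List String)) (h : (graph.map Prod.fst).Nodup) :
    PySem.List.sorted
      ((PySem.List.sorted (graph.map Prod.fst) (fun x => x)).map (fun app => [("id", app)]) ++
        ((PySem.List.sorted (PySem.Set.ofList (graph.flatMap Prod.snd)) (fun x => x)).filter
          (fun t => !PySem.Dict.contains (⟨graph⟩ : PySem.Dict String (List String)) t)).map
          (fun t => [("id", t)]))
      (fun x => (PySem.Dict.get? (⟨x⟩ : PySem.Dict String String) "id").getD "") =
    (PySem.List.sorted
      (PySem.Set.union (PySem.Set.ofList (graph.map Prod.fst))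
        (PySem.Set.ofList (graph.flatMap Prod.snd))) (fun x => x)).map (fun i => [("id", i)]) := by
  have hkf : ∀ i : String,
      ((PySem.Dict.get? (⟨[("id", i)]⟩ : PySem.Dict String String) "id").getD "") = i := by
    intro i; simp [PySem.Dict.get?]
  have hq_iff : ∀ a : String,
      ((!PySem.Dict.contains (⟨graph⟩ : PySem.Dict String (List String)) a) = true) ↔
        a ∉ graph.map Prod.fst := by
    intro a
    rw [Bool.not_eq_true']
    rw [← Bool.not_eq_true]
    exact not_congr (contains_keys graph a)
  have hUnodup : (PySem.Set.union (PySem.Set.ofList (graph.map Prod.fst))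
      (PySem.Set.ofList (graph.flatMap Prod.snd))).Nodup :=
    PySem.Set.nodup_union _ _ (PySem.Set.nodup_ofList _)
  have hsortnodup : (PySem.List.sorted (PySem.Set.union (PySem.Set.ofList (graph.map Prod.fst))
      (PySem.Set.ofList (graph.flatMap Prod.snd))) (fun x => x)).Nodup :=
    ((PySem.List.sorted_perm _ (fun x => x) false).nodup_iff).mpr hUnodup
  have hpw := pairwise_lt_of_nodup_sorted
    (PySem.List.sorted_pairwise (PySem.Set.union (PySem.Set.ofList (graph.map Prod.fst))
      (PySem.Set.ofList (graph.flatMap Prod.snd))) (fun x => x)) hsortnodup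
  have hpwmap : ((PySem.List.sorted (PySem.Set.union (PySem.Set.ofList (graph.map Prod.fst))
      (PySem.Set.ofList (graph.flatMap Prod.snd))) (fun x => x)).map
        (fun i => [("id", i)])).Pairwise
      (fun a b => ((PySem.Dict.get? (⟨a⟩ : PySem.Dict String String) "id").getD "") <
                  ((PySem.Dict.get? (⟨b⟩ : PySem.Dict String String) "id").getD "")) := by
    rw [List.pairwise_map]
    exact hpw.imp (fun hab => by simpa [hkf] using hab)
  have hperm2 : (PySem.Set.union (PySem.Set.ofList (graph.map Prod.fst))
      (PySem.Set.ofList (graph.flatMap Prod.snd))).Perm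
      ((graph.map Prod.fst) ++
        (PySem.Set.ofList (graph.flatMap Prod.snd)).filter
          (fun t => !PySem.Dict.contains (⟨graph⟩ : PySem.Dict String (List String)) t)) := by
    have hnodR : ((graph.map Prod.fst) ++
        (PySem.Set.ofList (graph.flatMap Prod.snd)).filter
          (fun t => !PySem.Dict.contains (⟨graph⟩ : PySem.Dict String (List String)) t)).Nodup := by
      refine List.Nodup.append h ((PySem.Set.nodup_ofList _).filter _) ?_
      intro a ha hafil
      exact (hq_iff a).mp (List.mem_filter.mp hafil).2 ha
    rw [List.perm_ext_iff_of_nodup hUnodup hnodR]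
    intro a
    rw [PySem.Set.mem_union, PySem.Set.mem_ofList, PySem.Set.mem_ofList]
    rw [List.mem_append, List.mem_filter]
    by_cases ha : a ∈ graph.map Prod.fst
    · simp [ha]
    · constructor
      · rintro (hk | hf)
        · exact Or.inl hk
        · exact Or.inr ⟨(PySem.Set.mem_ofList _ _).mpr hf, (hq_iff a).mpr ha⟩
      · rintro (hk | ⟨hf, _⟩)
        · exact Or.inl hk
        · exact Or.inr ((PySem.Set.mem_ofList _ _).mp hf)
  have hperm : ((PySem.List.sorted (PySem.Set.union (PySem.Set.ofList (graph.map Prod.fst))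
      (PySem.Set.ofList (graph.flatMap Prod.snd))) (fun x => x)).map (fun i => [("id", i)])).Perm
      ((PySem.List.sorted (graph.map Prod.fst) (fun x => x)).map (fun app => [("id", app)]) ++
        ((PySem.List.sorted (PySem.Set.ofList (graph.flatMap Prod.snd)) (fun x => x)).filter
          (fun t => !PySem.Dict.contains (⟨graph⟩ : PySem.Dict String (List String)) t)).map
          (fun t => [("id", t)])) := by
    rw [← List.map_append]
    apply List.Perm.map
    exact (PySem.List.sorted_perm _ (fun x => x) false).trans
      (hperm2.trans (List.Perm.append (PySem.List.sorted_perm _ (fun x => x) false).symm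
        (((PySem.List.sorted_perm (PySem.Set.ofList (graph.flatMap Prod.snd))
            (fun x => x) false).symm).filter _)))
  exact PySem.List.sorted_eq_of_perm_of_pairwise_lt _ _ _ hperm hpwmap

theorem inner_fold (s : String) :
    ∀ (L : List String) (E : List (List (String × String)))
      (S : PySem.Set (String × String)) (P : PySem.Set String),
      (∀ t, ((s, t) ∈ S ↔ t ∈ P)) →
      (L.foldl (estep s) (E, S)).1 =
        E ++ ((PySem.Set.update P L).drop P.length).map (ebox s) ∧
      ∀ p ∈ (L.foldl (estep s) (E, S)).2, p ∈ S ∨ p.1 = s := by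
  intro L
  induction L with
  | nil => intro E S P hSP; exact ⟨by simp [PySem.Set.update], fun p hp => Or.inl hp⟩
  | cons t L ih =>
    intro E S P hSP
    by_cases hc : t ∈ P
    · have hm : (s, t) ∈ S := (hSP t).mpr hc
      have hstep : estep s (E, S) t = (E, S) := by
        simp [estep, PySem.Set.contains, hm]
      have hadd : PySem.Set.add P t = P := by
        simp [PySem.Set.add, PySem.Set.contains, hc]
      have := ih E S P hSP
      simp only [List.foldl_cons, hstep]
      constructor
      · rw [this.1]; show _ = E ++ (List.drop P.length (PySem.Set.update (PySem.Set.add P t) L)).map _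
        rw [hadd]
      · exact this.2
    · have hm : (s, t) ∉ S := fun hmem => hc ((hSP t).mp hmem)
      have hstep : estep s (E, S) t = (E ++ [ebox s t], S.add (s, t)) := by
        simp [estep, PySem.Set.contains, hm]
      have hPadd : PySem.Set.add P t = P ++ [t] := by
        simp [PySem.Set.add, PySem.Set.contains, hc]
      have hSP2 : ∀ t', ((s, t') ∈ S.add (s, t) ↔ t' ∈ PySem.Set.add P t) := by
        intro t'
        rw [PySem.Set.mem_add, hPadd]
        simp only [List.mem_append, List.mem_singleton]
        constructor
        · rintro (hm | he)
          · exact Or.inl ((hSP t').mp hm)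
          · exact Or.inr (by injection he with _ h2)
        · rintro (hm | rfl)
          · exact Or.inl ((hSP t').mpr hm)
          · exact Or.inr rfl
      have := ih (E ++ [ebox s t]) (S.add (s, t)) (PySem.Set.add P t) hSP2
      simp only [List.foldl_cons, hstep]
      refine ⟨?_, ?_⟩
      · rw [this.1]
        show E ++ [ebox s t] ++ _ = E ++ (List.drop P.length (PySem.Set.update (PySem.Set.add P t) L)).map _
        obtain ⟨R, hR⟩ := update_prefix L (PySem.Set.add P t)
        rw [hR, hPadd]
        have h3 : List.drop P.length (P ++ [t] ++ R) = t :: R := by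
          rw [List.append_assoc]; exact List.drop_left' rfl
        have h2 : List.drop (P ++ [t]).length (P ++ [t] ++ R) = R := by
          simpa using List.drop_left' (l₁ := P ++ [t]) rfl
        rw [h3, h2]
        simp
      · intro p hp
        rcases this.2 p hp with hm | he
        · rcases (PySem.Set.mem_add S (s, t) p).mp hm with h1 | h1
          · exact Or.inl h1
          · exact Or.inr (by rw [h1])
        · exact Or.inr he

theorem outer_fold :
    ∀ (graph : List (String × List String)) (E : List (List (String × String)))
      (S : PySem.Set (String × String)),
      (graph.map Prod.fst).Nodup →
      (∀ p ∈ S, p.1 ∉ graph.map Prod.fst) →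
      (graph.foldl
        (fun st sv => (PySem.List.sorted sv.2 (fun x => x)).foldl (estep sv.1) st) (E, S)).1 =
      E ++ graph.flatMap (fun sv =>
        (PySem.List.sorted (PySem.Set.ofList sv.2) (fun x => x)).map (ebox sv.1)) := by
  intro graph
  induction graph with
  | nil => intros; simp
  | cons sv g ih =>
    intro E S hnd hS
    simp only [List.foldl_cons, List.flatMap_cons]
    have hSP : ∀ t, ((sv.1, t) ∈ S ↔ t ∈ (PySem.Set.empty : PySem.Set String)) := by
      intro t
      simp only [PySem.Set.empty, List.not_mem_nil, iff_false]
      exact fun hmem => hS _ hmem (by simp)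
    obtain ⟨h1, h2⟩ := inner_fold sv.1 (PySem.List.sorted sv.2 (fun x => x)) E S PySem.Set.empty hSP
    set st1 := (PySem.List.sorted sv.2 (fun x => x)).foldl (estep sv.1) (E, S) with hst1
    have hpair : st1 = (st1.1, st1.2) := rfl
    rw [hpair]
    have hnd' : (g.map Prod.fst).Nodup := (List.nodup_cons.mp (by simpa using hnd)).2
    have hhead : sv.1 ∉ g.map Prod.fst := (List.nodup_cons.mp (by simpa using hnd)).1
    rw [ih st1.1 st1.2 hnd' ?_]
    · rw [h1]
      have hup : PySem.Set.update (PySem.Set.empty : PySem.Set String)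
          (PySem.List.sorted sv.2 (fun x => x)) =
          PySem.Set.ofList (PySem.List.sorted sv.2 (fun x => x)) := rfl
      rw [hup, sorted_ofList_comm]
      simp [PySem.Set.empty]
    · intro p hp
      rcases h2 p hp with hmem | heq
      · intro hk; exact hS p hmem (by simp [hk])
      · rw [heq]; exact hhead

theorem edges_eq (graph : List (String × List String)) (h : (graph.map Prod.fst).Nodup) :
    (graph.foldl
      (fun (st : List (List (String × String)) × PySem.Set (String × String)) sv =>
        (PySem.List.sorted sv.2 (fun x => x)).foldl
          (fun st target =>
            if PySem.Set.contains st.2 (sv.1, target) then st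
            else (st.1 ++ [[("source", sv.1), ("target", target)]],
                  PySem.Set.add st.2 (sv.1, target)))
          st)
      ([], PySem.Set.empty)).1 =
    graph.flatMap (fun sv =>
      (PySem.List.sorted (PySem.Set.ofList sv.2) (fun x => x)).map
        (fun t => [("source", sv.1), ("target", t)])) := by
  exact outer_fold graph [] PySem.Set.empty h
    (by intro p hp; simp [PySem.Set.empty] at hp)

-- ---- B-side lemmas ----

theorem sorted2_lex (xs : List (Int × String × String)) :
    PySem.List.sorted2 xs (fun p => p.1) (fun p => p.2.2) =
    PySem.List.sorted xs tkey := by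
  simp only [PySem.List.sorted2, PySem.List.sorted, if_neg (by decide : ¬ (false = true))]
  congr 1
  funext acc x
  congr 1
  funext a b
  have hiff : tkey a < tkey b ↔ (a.1 < b.1 ∨ (¬ b.1 < a.1 ∧ a.2.2 < b.2.2)) := by
    rw [tkey, tkey, Prod.Lex.lt_iff]
    constructor
    · rintro (h | ⟨he, hs⟩)
      · exact Or.inl h
      · exact Or.inr ⟨by simp only [ofLex_toLex] at he ⊢; omega, by simpa using hs⟩
    · rintro (h | ⟨hnb, hs⟩)
      · exact Or.inl (by simpa using h)
      · by_cases ha : a.1 < b.1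
        · exact Or.inl (by simpa using ha)
        · exact Or.inr ⟨by simp only [ofLex_toLex]; omega, by simpa using hs⟩
  rw [show (decide (tkey a < tkey b)) =
        decide (a.1 < b.1 ∨ (¬ b.1 < a.1 ∧ a.2.2 < b.2.2)) from decide_eq_decide.mpr hiff]
  have hx : (!decide (b.1 < a.1)) = decide (a.1 ≤ b.1) := by
    by_cases h : b.1 < a.1 <;> simp [h] <;> omega
  simp [hx]

theorem mem_blk (isv : Int × String × List String) (p : Int × String × String) :
    p ∈ blk isv ↔ ∃ t ∈ isv.2.2, p = (isv.1, isv.2.1, t) := by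
  simp only [blk, List.mem_map, PySem.List.mem_sorted, PySem.Set.mem_ofList]
  constructor
  · rintro ⟨t, ht, rfl⟩; exact ⟨t, ht, rfl⟩
  · rintro ⟨t, ht, rfl⟩; exact ⟨t, ht, rfl⟩

theorem ysOf_lower : ∀ (g : List (String × List String)) (s : Int) (p : Int × String × String),
    p ∈ ysOf g s → s ≤ p.1 := by
  intro g
  induction g with
  | nil => intro s p hp; simp [ysOf, PySem.List.enumerate_nil] at hp
  | cons x g ih =>
    intro s p hp
    rw [ysOf, PySem.List.enumerate_cons, List.flatMap_cons, List.mem_append] at hp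
    rcases hp with hp | hp
    · obtain ⟨t, _, rfl⟩ := (mem_blk _ _).mp hp
      exact le_refl s
    · have := ih (s + 1) p hp
      omega

theorem ysOf_pairwise : ∀ (g : List (String × List String)) (s : Int),
    (ysOf g s).Pairwise (fun a b => tkey a < tkey b) := by
  intro g
  induction g with
  | nil => intro s; simp [ysOf, PySem.List.enumerate_nil]
  | cons x g ih =>
    intro s
    rw [ysOf, PySem.List.enumerate_cons, List.flatMap_cons]
    rw [List.pairwise_append]
    refine ⟨?_, ih (s + 1), ?_⟩
    · rw [blk, List.pairwise_map]
      exact (PySem.List.sorted_ofList_pairwise_lt x.2).imp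
        (fun h => by
          rw [tkey, tkey, Prod.Lex.lt_iff]
          exact Or.inr ⟨rfl, by simpa using h⟩)
    · intro a ha b hb
      obtain ⟨t, _, rfl⟩ := (mem_blk _ _).mp ha
      have hbl := ysOf_lower g (s + 1) b hb
      rw [tkey, tkey, Prod.Lex.lt_iff]
      exact Or.inl (by simpa using by omega)

theorem mem_ysOf (g : List (String × List String)) (s : Int) (p : Int × String × String) :
    p ∈ ysOf g s ↔
      p ∈ (PySem.List.enumerate g s).flatMap
            (fun isv => isv.2.2.map (fun t => (isv.1, isv.2.1, t))) := by
  simp only [ysOf, List.mem_flatMap, mem_blk]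
  constructor
  · rintro ⟨isv, hisv, t, ht, rfl⟩
    exact ⟨isv, hisv, List.mem_map.mpr ⟨t, ht, rfl⟩⟩
  · rintro ⟨isv, hisv, hp⟩
    obtain ⟨t, ht, rfl⟩ := List.mem_map.mp hp
    exact ⟨isv, hisv, t, ht, rfl⟩

theorem pairs_eq (graph : List (String × List String)) :
    PySem.List.sorted2
      (PySem.Set.ofList ((PySem.List.enumerate graph).flatMap
        (fun isv => isv.2.2.map (fun t => (isv.1, isv.2.1, t)))))
      (fun p => p.1) (fun p => p.2.2) = ysOf graph 0 := by
  rw [sorted2_lex]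
  apply PySem.List.sorted_eq_of_perm_of_pairwise_lt
  · rw [List.perm_ext_iff_of_nodup
      ((ysOf_pairwise graph 0).imp (fun {a b} h => by rintro rfl; exact lt_irrefl _ h))
      (PySem.Set.nodup_ofList _)]
    intro p
    rw [PySem.Set.mem_ofList, mem_ysOf]
  · exact ysOf_pairwise graph 0

theorem enumerate_flatMap_snd {β : Type} (F : String × List String → List β) :
    ∀ (g : List (String × List String)) (s : Int),
      (PySem.List.enumerate g s).flatMap (fun isv => F isv.2) = g.flatMap F := by
  intro g
  induction g with
  | nil => intro s; simp [PySem.List.enumerate_nil]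
  | cons x g ih =>
    intro s
    rw [PySem.List.enumerate_cons, List.flatMap_cons, List.flatMap_cons, ih (s + 1)]

theorem ysOf_map_ebox (graph : List (String × List String)) :
    (ysOf graph 0).map (fun p => [("source", p.2.1), ("target", p.2.2)]) =
    graph.flatMap (fun sv =>
      (PySem.List.sorted (PySem.Set.ofList sv.2) (fun x => x)).map
        (fun t => [("source", sv.1), ("target", t)])) := by
  rw [ysOf, List.map_flatMap]
  have : (fun isv : Int × String × List String =>
      (blk isv).map (fun p => [("source", p.2.1), ("target", p.2.2)])) =
      (fun isv : Int × String × List String =>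
        (PySem.List.sorted (PySem.Set.ofList isv.2.2) (fun x => x)).map
          (fun t => [("source", isv.2.1), ("target", t)])) := by
    funext isv
    rw [blk, List.map_map]
    rfl
  rw [this]
  exact enumerate_flatMap_snd
    (fun sv => (PySem.List.sorted (PySem.Set.ofList sv.2) (fun x => x)).map
      (fun t => [("source", sv.1), ("target", t)])) graph 0

theorem ysOf_map_snd_snd (graph : List (String × List String)) :
    (ysOf graph 0).map (fun p => p.2.2) =
    graph.flatMap (fun sv => PySem.List.sorted (PySem.Set.ofList sv.2) (fun x => x)) := by
  rw [ysOf, List.map_flatMap]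
  have : (fun isv : Int × String × List String => (blk isv).map (fun p => p.2.2)) =
      (fun isv : Int × String × List String =>
        PySem.List.sorted (PySem.Set.ofList isv.2.2) (fun x => x)) := by
    funext isv
    rw [blk, List.map_map]
    simp [Function.comp_def]
  rw [this]
  exact enumerate_flatMap_snd
    (fun sv => PySem.List.sorted (PySem.Set.ofList sv.2) (fun x => x)) graph 0

theorem le_getLast_of_pairwise_lt :
    ∀ (P : List String) (h : P ≠ []), P.Pairwise (· < ·) → ∀ x ∈ P, x ≤ P.getLast h := by
  intro P
  induction P with
  | nil => intro h; exact absurd rfl h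
  | cons a Q ih =>
    intro _ hpw x hx
    rcases List.pairwise_cons.mp hpw with ⟨ha, hQ⟩
    cases Q with
    | nil =>
      simp only [List.mem_singleton] at hx
      simp [hx]
    | cons b Q' =>
      rw [List.getLast_cons (by simp)]
      rcases List.mem_cons.mp hx with rfl | hx'
      · have : (b :: Q').getLast (by simp) ∈ b :: Q' := List.getLast_mem _
        exact le_of_lt (ha _ this)
      · exact ih (by simp) hQ x hx'

theorem nodes_fold :
    ∀ (l : List String) (P : List String),
      P.Pairwise (· < ·) → (∀ a ∈ P, ∀ b ∈ l, a ≤ b) → l.Pairwise (· ≤ ·) →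
      l.foldl nstep (P.map nbox) = (PySem.Set.update P l).map nbox := by
  intro l
  induction l with
  | nil => intro P _ _ _; simp [PySem.Set.update]
  | cons x l ih =>
    intro P hP hPl hl
    have hle : ∀ a ∈ P, a ≤ x := fun a ha => hPl a ha x (by simp)
    have hcond : nstep (P.map nbox) x =
        if x ∈ P then P.map nbox else P.map nbox ++ [nbox x] := by
      cases hPe : P with
      | nil => simp [nstep]
      | cons q Q =>
        rw [← hPe]
        have hne : P.map nbox ≠ [] := by simp [hPe]
        have hlast : PySem.List.pyGetD (P.map nbox) (-1) [] = nbox (P.getLast (by simp [hPe])) := by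
          rw [PySem.List.pyGetD_neg_one (P.map nbox) [] hne, List.getLast_map]
        have hid : ((PySem.Dict.get?
            (⟨nbox (P.getLast (by simp [hPe]))⟩ : PySem.Dict String String) "id").getD "") =
            P.getLast (by simp [hPe]) := by
          simp [PySem.Dict.get?, nbox]
        rw [nstep, hlast, hid]
        have hempty : (P.map nbox).isEmpty = false := by simp [hPe]
        rw [hempty]
        by_cases hx : x ∈ P
        · have hxlast : P.getLast (by simp [hPe]) = x :=
            le_antisymm (hle _ (List.getLast_mem _))
              (le_getLast_of_pairwise_lt P (by simp [hPe]) hP x hx)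
          simp [hxlast, hx]
        · have hne2 : P.getLast (by simp [hPe]) ≠ x := by
            intro he; exact hx (he ▸ List.getLast_mem _)
          simp [hne2, hx]
    have hxl : ∀ b ∈ l, x ≤ b := (List.pairwise_cons.mp hl).1
    have hl' : l.Pairwise (· ≤ ·) := (List.pairwise_cons.mp hl).2
    rw [List.foldl_cons, hcond]
    show _ = (PySem.Set.update (PySem.Set.add P x) l).map nbox
    by_cases hx : x ∈ P
    · have hadd : PySem.Set.add P x = P := by
        simp [PySem.Set.add, PySem.Set.contains, hx]
      rw [if_pos hx, hadd]
      exact ih P hP (fun a ha b hb => hPl a ha b (by simp [hb])) hl'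
    · have hadd : PySem.Set.add P x = P ++ [x] := by
        simp [PySem.Set.add, PySem.Set.contains, hx]
      rw [if_neg hx, hadd]
      have hmap : P.map nbox ++ [nbox x] = (P ++ [x]).map nbox := by simp [nbox]
      rw [hmap]
      apply ih (P ++ [x])
      · rw [List.pairwise_append]
        refine ⟨hP, by simp, ?_⟩
        intro a ha b hb
        rw [List.mem_singleton] at hb
        subst hb
        exact lt_of_le_of_ne (hle a ha) (fun he => hx (he ▸ ha))
      · intro a ha b hb
        rcases List.mem_append.mp ha with ha' | ha'
        · exact hPl a ha' b (by simp [hb])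
        · rw [List.mem_singleton] at ha'
          subst ha'
          exact hxl b hb
      · exact hl'

theorem ids_set_eq (graph : List (String × List String)) :
    PySem.List.sorted
      (PySem.Set.ofList (graph.map Prod.fst ++ (ysOf graph 0).map (fun p => p.2.2)))
      (fun x => x) =
    PySem.List.sorted
      (PySem.Set.union (PySem.Set.ofList (graph.map Prod.fst))
        (PySem.Set.ofList (graph.flatMap Prod.snd))) (fun x => x) := by
  apply PySem.List.sorted_eq_sorted_of_perm _ _ _ (fun a b h => h)
  rw [List.perm_ext_iff_of_nodup (PySem.Set.nodup_ofList _)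
    (PySem.Set.nodup_union _ _ (PySem.Set.nodup_ofList _))]
  intro a
  rw [PySem.Set.mem_ofList, PySem.Set.mem_union, PySem.Set.mem_ofList, PySem.Set.mem_ofList]
  rw [List.mem_append, ysOf_map_snd_snd]
  constructor
  · rintro (hk | ht)
    · exact Or.inl hk
    · right
      obtain ⟨sv, hsv, hin⟩ := List.mem_flatMap.mp ht
      rw [PySem.List.mem_sorted, PySem.Set.mem_ofList] at hin
      exact List.mem_flatMap.mpr ⟨sv, hsv, hin⟩
  · rintro (hk | ht)
    · exact Or.inl hk
    · right
      obtain ⟨sv, hsv, hin⟩ := List.mem_flatMap.mp ht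
      exact List.mem_flatMap.mpr ⟨sv, hsv, by rw [PySem.List.mem_sorted, PySem.Set.mem_ofList]; exact hin⟩

-- ===== VERDICT (by name: the statement is the Claim_ definition above) =====
theorem to_nodes_edges_spec : Claim_equal_to_nodes_edges := by
  intro graph _ hpre
  unfold Spec_to_nodes_edges to_nodes_edges to_nodes_edges_alt
  simp only []
  rw [edges_eq graph hpre, pairs_eq graph, ysOf_map_ebox graph]
  -- nodes sides
  have hfe : (fun (nodes : List (List (String × String))) (t : String) =>
        if PySem.Dict.contains (⟨graph⟩ : PySem.Dict String (List String)) t then nodes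
        else nodes ++ [[("id", t)]]) =
      (fun nodes t =>
        if (!PySem.Dict.contains (⟨graph⟩ : PySem.Dict String (List String)) t)
        then nodes ++ [[("id", t)]] else nodes) := by
    funext nodes t
    by_cases hh : PySem.Dict.contains (⟨graph⟩ : PySem.Dict String (List String)) t <;> simp [hh]
  rw [hfe, PySem.List.foldl_append_if
        (fun t => !PySem.Dict.contains (⟨graph⟩ : PySem.Dict String (List String)) t)
        (fun t => [("id", t)])]
  rw [nodes_eq graph hpre]
  -- B's node fold on the sorted ids list
  rw [show (fun (nodes : List (List (String × String))) (x : String) =>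
      if nodes.isEmpty ||
         (((PySem.Dict.get? (⟨PySem.List.pyGetD nodes (-1) []⟩ : PySem.Dict String String) "id").getD "") != x)
      then nodes ++ [[("id", x)]] else nodes) = nstep from rfl]
  have hids : (PySem.List.sorted (graph.map Prod.fst ++ (ysOf graph 0).map (fun p => p.2.2))
      (fun x => x)).foldl nstep ([] : List (List (String × String))) =
      (PySem.Set.ofList (PySem.List.sorted
        (graph.map Prod.fst ++ (ysOf graph 0).map (fun p => p.2.2)) (fun x => x))).map nbox :=
    nodes_fold _ [] (by simp) (by simp) (PySem.List.sorted_pairwise _ (fun x => x))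
  rw [hids, sorted_ofList_comm, ids_set_eq graph]
  rfl
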